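-- pv_equiv track=rewrite | github.com/starlingx/stx-puppet | puppet-manifests/src/bin/apply_network_config.py | sort_ifaces_by_type
-- ===== SOURCE A (Python) =====
-- def sort_ifaces_by_type(config, ifaces, type_order):
--     ifaces_types = config["ifaces_types"]
--     ifaces_by_type = dict()
--     for iface in ifaces:
--         iftype = ifaces_types[iface]
--         iface_list = ifaces_by_type.setdefault(iftype, [])
--         iface_list.append(iface)
--     sorted_ifaces = []
--     for iftype in type_order:
--         if iface_list := ifaces_by_type.get(iftype, None):
--             iface_list.sort()
--             sorted_ifaces.extend(iface_list)
--     return sorted_ifaces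
-- ===== SOURCE B (Python) =====
-- def sort_ifaces_by_type(config, ifaces, type_order):
--     ifaces_types = config["ifaces_types"]
--     return [iface
--             for iftype in type_order
--             for iface in sorted(i for i in ifaces if ifaces_types[i] == iftype)]
-- ===== Notes on version B (the rewrite author's own statement) =====
-- stated objective: simpler
-- what changed: Replaces the explicit grouping dict (setdefault/append, then lookup, in-place sort and truthiness-guarded extend) with a single nested comprehension that, for each type in order, rescans and sorts the matching interfaces.
import Mathlib
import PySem

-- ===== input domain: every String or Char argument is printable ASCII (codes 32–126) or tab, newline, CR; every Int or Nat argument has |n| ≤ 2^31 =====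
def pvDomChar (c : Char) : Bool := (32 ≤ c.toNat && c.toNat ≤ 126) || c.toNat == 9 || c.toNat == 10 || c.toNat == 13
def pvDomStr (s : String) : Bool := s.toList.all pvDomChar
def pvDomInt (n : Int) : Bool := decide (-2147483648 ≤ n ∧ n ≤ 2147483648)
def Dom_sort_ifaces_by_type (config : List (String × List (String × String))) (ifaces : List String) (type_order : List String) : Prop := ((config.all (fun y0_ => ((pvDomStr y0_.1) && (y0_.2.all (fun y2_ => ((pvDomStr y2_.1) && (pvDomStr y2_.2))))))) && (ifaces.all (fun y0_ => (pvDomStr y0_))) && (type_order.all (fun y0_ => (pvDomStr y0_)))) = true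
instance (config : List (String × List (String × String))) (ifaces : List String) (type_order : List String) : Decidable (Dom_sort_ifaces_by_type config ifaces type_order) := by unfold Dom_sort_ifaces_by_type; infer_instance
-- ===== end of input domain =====

-- B replaces A's grouping dict with one nested comprehension (per type in order: rescan, sort, emit); simpler, not faster.

-- ===== PORT A =====
def sort_ifaces_by_type (config : List (String × List (String × String))) (ifaces : List String) (type_order : List String) : List String :=
  -- config["ifaces_types"] raises KeyError when absent: excluded by Pre_, getD with [] here
  let ifaces_types : PySem.Dict String String :=
    PySem.Dict.ofList ((PySem.Dict.ofList config).getD "ifaces_types" [])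
  -- for iface in ifaces: setdefault(iftype, []).append(iface)  ≡  modify iftype [] (· ++ [iface]);
  -- ifaces_types[iface] raises KeyError on a missing key: excluded by Pre_, getD with "" here
  let ifaces_by_type : PySem.Dict String (List String) :=
    ifaces.foldl (fun d iface => d.modify (ifaces_types.getD iface "") [] (· ++ [iface])) PySem.Dict.empty
  -- for iftype in type_order: walrus get (None and [] falsy), in-place sort (pure re-sort: same value), extend
  type_order.foldl (fun acc iftype =>
    match ifaces_by_type.get? iftype with
    | some iface_list =>
        if iface_list.isEmpty then acc
        else acc ++ PySem.List.sorted iface_list (fun x => x) false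
    | none => acc) []

-- ===== PORT B =====
def sort_ifaces_by_type_alt (config : List (String × List (String × String))) (ifaces : List String) (type_order : List String) : List String :=
  let ifaces_types : PySem.Dict String String :=
    PySem.Dict.ofList ((PySem.Dict.ofList config).getD "ifaces_types" [])
  type_order.flatMap (fun iftype =>
    PySem.List.sorted (ifaces.filter (fun i => ifaces_types.getD i "" == iftype)) (fun x => x) false)

-- ===== PRECONDITION & SPEC =====
-- Pre_ = exactly the inputs A returns on: config has key "ifaces_types" and every iface has a type (else KeyError)
def Pre_sort_ifaces_by_type (config : List (String × List (String × String))) (ifaces : List String) (type_order : List String) : Prop :=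
  (PySem.Dict.ofList config).contains "ifaces_types" = true ∧
  ∀ i ∈ ifaces, (PySem.Dict.ofList ((PySem.Dict.ofList config).getD "ifaces_types" [])).contains i = true
instance (config : List (String × List (String × String))) (ifaces : List String) (type_order : List String) : Decidable (Pre_sort_ifaces_by_type config ifaces type_order) := by unfold Pre_sort_ifaces_by_type; infer_instance
def pvWitness_sort_ifaces_by_type : (List (String × List (String × String))) × List String × List String :=
  ([("ifaces_types", [("eth1", "vlan"), ("eth0", "ethernet")])], ["eth1", "eth0"], ["ethernet", "vlan"])


def Spec_sort_ifaces_by_type (config : List (String × List (String × String))) (ifaces : List String) (type_order : List String) (out : List String) : Prop := out = sort_ifaces_by_type_alt config ifaces type_order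
instance (config : List (String × List (String × String))) (ifaces : List String) (type_order : List String) (out : List String) : Decidable (Spec_sort_ifaces_by_type config ifaces type_order out) := by unfold Spec_sort_ifaces_by_type; infer_instance

-- ===== CLAIM (what is proved, stated in full; the proofs are below) =====
def Claim_equal_sort_ifaces_by_type : Prop := ∀ (config : List (String × List (String × String))) (ifaces : List String) (type_order : List String), Dom_sort_ifaces_by_type config ifaces type_order → Pre_sort_ifaces_by_type config ifaces type_order → Spec_sort_ifaces_by_type config ifaces type_order (sort_ifaces_by_type config ifaces type_order)

-- ===== LEMMAS AND PROOFS =====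

-- the grouping loop's bucket at t is exactly the filter of ifaces by key
theorem pv_group_getD (key : String → String) (ifaces : List String)
    (d : PySem.Dict String (List String)) (t : String) :
    (ifaces.foldl (fun d i => d.modify (key i) [] (· ++ [i])) d).getD t []
      = d.getD t [] ++ ifaces.filter (fun i => key i == t) := by
  have h : ifaces.foldl (fun d i => d.modify (key i) [] (· ++ [i])) d
      = (ifaces.map (fun i => (key i, i))).foldl (fun d p => d.modify p.1 [] (· ++ [p.2])) d := by
    rw [List.foldl_map]
  rw [h, PySem.Dict.getD_foldl_modify_append]
  simp [List.filter_map, Function.comp_def]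

theorem pv_group_keys (key : String → String) (ifaces : List String) (t : String)
    (h : (ifaces.foldl (fun d i => d.modify (key i) [] (· ++ [i]))
            (PySem.Dict.empty : PySem.Dict String (List String))).get? t = none) :
    ifaces.filter (fun i => key i == t) = [] := by
  rw [PySem.Dict.get?_eq_none_iff_not_mem_keys] at h
  rw [PySem.Dict.keys_foldl_modify_key] at h
  rw [List.filter_eq_nil_iff]
  intro i hi hk
  apply h
  rw [PySem.Set.mem_update]
  right
  exact List.mem_map.2 ⟨i, hi, by simpa using hk⟩

theorem pv_step (key : String → String) (ifaces : List String) (t : String) (acc : List String) :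
    (match (ifaces.foldl (fun d i => d.modify (key i) [] (· ++ [i]))
              (PySem.Dict.empty : PySem.Dict String (List String))).get? t with
     | some l => if l.isEmpty then acc else acc ++ PySem.List.sorted l (fun x => x) false
     | none => acc)
      = acc ++ PySem.List.sorted (ifaces.filter (fun i => key i == t)) (fun x => x) false := by
  cases h : (ifaces.foldl (fun d i => d.modify (key i) [] (· ++ [i]))
              (PySem.Dict.empty : PySem.Dict String (List String))).get? t with
  | none =>
      simp [pv_group_keys key ifaces t h, PySem.List.sorted]
  | some l =>
      have hl : l = ifaces.filter (fun i => key i == t) := by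
        have := pv_group_getD key ifaces PySem.Dict.empty t
        rwa [PySem.Dict.getD_eq_get?_getD, h, Option.getD_some, PySem.Dict.getD_empty, List.nil_append] at this
      subst hl
      by_cases he : (ifaces.filter (fun i => key i == t)).isEmpty
      · simp [List.isEmpty_iff.1 he, PySem.List.sorted]
      · simp [he]

-- ===== VERDICT (by name: the statement is the Claim_ definition above) =====
theorem sort_ifaces_by_type_spec : Claim_equal_sort_ifaces_by_type := by
  intro config ifaces type_order _ _
  unfold Spec_sort_ifaces_by_type sort_ifaces_by_type sort_ifaces_by_type_alt
  have hstep := pv_step (fun i =>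
      (PySem.Dict.ofList ((PySem.Dict.ofList config).getD "ifaces_types" [])).getD i "") ifaces
  rw [List.foldl_ext _ _ _ (fun acc iftype _ => hstep iftype acc),
     PySem.List.foldl_append_eq_flatMap, List.nil_append]
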